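-- pv_equiv track=rewrite | github.com/manishkumar98/investor-ops-and-intelligence-suite | phase3_review_pillar_b/theme_clusterer.py | _sample_reviews
-- ===== SOURCE A (Python) =====
-- def _count_words(text: str) -> int:
--     return len(text.split()) if isinstance(text, str) else 0
--
-- def _sample_reviews(reviews: list[dict], max_words: int = 9000) -> list[dict]:
--     """From M2 sample_data — cap total word count to avoid LLM token overflow."""
--     total = 0
--     sampled = []
--     for r in reviews:
--         wc = _count_words(r.get("review_text", ""))
--         if total + wc > max_words:
--             break
--         sampled.append(r)
--         total += wc
--     return sampled if sampled else reviews[:50]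
-- ===== SOURCE B (Python) =====
-- def _count_words(text: str) -> int:
--     return len(text.split()) if isinstance(text, str) else 0
--
-- def _sample_reviews(reviews: list[dict], max_words: int = 9000) -> list[dict]:
--     """Build all prefix word-count sums, then binary-search the cutoff."""
--     prefix = []
--     total = 0
--     for r in reviews:
--         total += _count_words(r.get("review_text", ""))
--         prefix.append(total)
--     # bisect_right on the non-decreasing prefix sums
--     lo, hi = 0, len(prefix)
--     while lo < hi:
--         mid = (lo + hi) // 2
--         if prefix[mid] <= max_words:
--             lo = mid + 1
--         else:
--             hi = mid
--     return reviews[:lo] if lo > 0 else reviews[:50]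
-- ===== Notes on version B (the rewrite author's own statement) =====
-- stated objective: alternative
-- what changed: Replaces A's single accumulate-with-early-break loop by first building the full list of prefix word-count sums and then locating the cutoff with a hand-written binary search (bisect_right) on that non-decreasing array, finally slicing reviews[:cutoff] (or reviews[:50] if the cutoff is 0).
import Mathlib
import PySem

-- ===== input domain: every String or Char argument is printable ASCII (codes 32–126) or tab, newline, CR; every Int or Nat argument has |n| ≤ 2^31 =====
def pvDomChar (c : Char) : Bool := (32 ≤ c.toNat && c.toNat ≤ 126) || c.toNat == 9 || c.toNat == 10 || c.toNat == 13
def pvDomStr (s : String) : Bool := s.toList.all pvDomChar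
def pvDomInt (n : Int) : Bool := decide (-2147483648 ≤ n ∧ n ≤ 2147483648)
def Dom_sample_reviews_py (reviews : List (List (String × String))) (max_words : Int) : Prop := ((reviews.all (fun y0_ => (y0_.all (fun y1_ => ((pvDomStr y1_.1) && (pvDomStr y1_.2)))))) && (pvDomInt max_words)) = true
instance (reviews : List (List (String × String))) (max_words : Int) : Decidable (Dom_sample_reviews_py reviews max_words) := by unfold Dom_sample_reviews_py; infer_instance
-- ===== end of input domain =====

-- B replaces A's accumulate-with-early-break loop by a build-all-prefix-sums pass followed by a
-- binary search (bisect_right) for the cutoff on the non-decreasing prefix array; objective: alternative.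

-- ===== PORT A =====
def countWords_py (text : String) : Int := ((PySem.Str.split₀ text).length : Int)

def sampleAux (max_words : Int) : List (List (String × String)) → Int → List (List (String × String)) → List (List (String × String))
  | [], _, sampled => sampled
  | r :: rest, total, sampled =>
    let wc := countWords_py ((PySem.Dict.mk r).getD "review_text" "")
    if max_words < total + wc then sampled
    else sampleAux max_words rest (total + wc) (sampled ++ [r])

def sample_reviews_py (reviews : List (List (String × String))) (max_words : Int) : List (List (String × String)) :=
  let sampled := sampleAux max_words reviews 0 []
  if sampled.isEmpty then PySem.List.slice reviews none (some 50) else sampled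

-- ===== PORT B =====
-- prefix-sum accumulation pass of Source B (list `prefix` plus running `total`)
def prefixStep (acc : List Int × Int) (r : List (String × String)) : List Int × Int :=
  let t := acc.2 + countWords_py ((PySem.Dict.mk r).getD "review_text" "")
  (acc.1 ++ [t], t)

-- the hand-written bisect_right while-loop of Source B (index always in range; getD 0 is exact)
def bisectAux (a : List Int) (x : Int) (lo hi : Nat) : Nat :=
  if _h : lo < hi then
    let mid := (lo + hi) / 2
    if a.getD mid 0 ≤ x then bisectAux a x (mid + 1) hi
    else bisectAux a x lo mid
  else lo
termination_by hi - lo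
decreasing_by all_goals omega

def sample_reviews_py_alt (reviews : List (List (String × String))) (max_words : Int) : List (List (String × String)) :=
  let pre := (reviews.foldl prefixStep ([], 0)).1
  let lo := bisectAux pre max_words 0 pre.length
  if 0 < lo then PySem.List.slice reviews none (some (lo : Int)) else PySem.List.slice reviews none (some 50)

-- ===== PRECONDITION & SPEC =====
def Spec_sample_reviews_py (reviews : List (List (String × String))) (max_words : Int) (out : List (List (String × String))) : Prop := out = sample_reviews_py_alt reviews max_words
instance (reviews : List (List (String × String))) (max_words : Int) (out : List (List (String × String))) : Decidable (Spec_sample_reviews_py reviews max_words out) := by unfold Spec_sample_reviews_py; infer_instance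

-- ===== CLAIM (what is proved, stated in full; the proofs are below) =====
def Claim_equal_sample_reviews_py : Prop := ∀ (reviews : List (List (String × String))) (max_words : Int), Dom_sample_reviews_py reviews max_words → Spec_sample_reviews_py reviews max_words (sample_reviews_py reviews max_words)

-- ===== LEMMAS AND PROOFS =====

-- running prefix sums of the word counts, starting from t
def prefixFrom (t : Int) : List (List (String × String)) → List Int
  | [] => []
  | r :: rest =>
    let t' := t + countWords_py ((PySem.Dict.mk r).getD "review_text" "")
    t' :: prefixFrom t' rest

theorem countWords_nonneg (s : String) : 0 ≤ countWords_py s := by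
  unfold countWords_py; positivity

theorem foldl_prefixStep (rs : List (List (String × String))) :
    ∀ (acc : List Int) (t : Int), (rs.foldl prefixStep (acc, t)).1 = acc ++ prefixFrom t rs := by
  induction rs with
  | nil => intro acc t; simp [prefixFrom]
  | cons r rest ih =>
      intro acc t
      simp only [List.foldl_cons, prefixStep, prefixFrom]
      rw [ih]
      simp

theorem length_prefixFrom (rs : List (List (String × String))) :
    ∀ t, (prefixFrom t rs).length = rs.length := by
  induction rs with
  | nil => intro t; simp [prefixFrom]
  | cons r rest ih => intro t; simp [prefixFrom, ih]

theorem le_of_mem_prefixFrom (rs : List (List (String × String))) :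
    ∀ t y, y ∈ prefixFrom t rs → t ≤ y := by
  induction rs with
  | nil => intro t y h; simp [prefixFrom] at h
  | cons r rest ih =>
      intro t y h
      simp only [prefixFrom, List.mem_cons] at h
      have hwc := countWords_nonneg ((PySem.Dict.mk r).getD "review_text" "")
      rcases h with h | h
      · omega
      · have := ih _ _ h; omega

theorem pairwise_prefixFrom (rs : List (List (String × String))) (t : Int) :
    (prefixFrom t rs).Pairwise (· ≤ ·) := by
  induction rs generalizing t with
  | nil => simp [prefixFrom]
  | cons r rest ih =>
      simp only [prefixFrom]
      refine List.Pairwise.cons (fun y hy => ?_) (ih _)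
      exact le_of_mem_prefixFrom rest _ y hy

theorem pairwise_getD_le (a : List Int) (hp : a.Pairwise (· ≤ ·)) (i j : Nat)
    (hij : i ≤ j) (hj : j < a.length) : a.getD i 0 ≤ a.getD j 0 := by
  have hi : i < a.length := lt_of_le_of_lt hij hj
  rw [List.getD_eq_getElem a 0 hi, List.getD_eq_getElem a 0 hj]
  rcases lt_or_eq_of_le hij with h | h
  · exact (List.pairwise_iff_getElem.mp hp) i j hi hj h
  · subst h; exact le_refl _

theorem takeWhile_len {α : Type} (p : α → Bool) (d : α) :
    ∀ (a : List α) (n : Nat), n ≤ a.length → (∀ i, i < n → p (a.getD i d) = true) →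
      (n < a.length → p (a.getD n d) = false) → (a.takeWhile p).length = n := by
  intro a
  induction a with
  | nil => intro n h _ _; simp only [List.length_nil] at h; simp only [List.takeWhile_nil, List.length_nil]; omega
  | cons b t ih =>
      intro n hn h1 h2
      cases n with
      | zero =>
          have := h2 (by simp)
          simp only [List.getD_cons_zero] at this
          simp [this]
      | succ m =>
          have hb := h1 0 (Nat.succ_pos m)
          simp only [List.getD_cons_zero] at hb
          simp only [List.takeWhile_cons, hb, if_true, List.length_cons]
          have := ih m (by simpa using hn)
            (fun i hi => by simpa using h1 (i + 1) (by omega))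
            (fun hm => by simpa using h2 (by simpa using hm))
          omega

theorem bisectAux_eq (a : List Int) (x : Int) (hp : a.Pairwise (· ≤ ·)) (lo hi : Nat)
    (h1 : lo ≤ hi) (h2 : hi ≤ a.length)
    (h3 : ∀ i, i < lo → a.getD i 0 ≤ x)
    (h4 : ∀ i, hi ≤ i → i < a.length → x < a.getD i 0) :
    bisectAux a x lo hi = (a.takeWhile (fun y => decide (y ≤ x))).length := by
  rw [bisectAux]
  by_cases h : lo < hi
  · simp only [h, dif_pos]
    by_cases hmid : a.getD ((lo + hi) / 2) 0 ≤ x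
    · simp only [hmid, if_pos]
      exact bisectAux_eq a x hp ((lo + hi) / 2 + 1) hi (by omega) h2
        (fun i hi' => le_trans (pairwise_getD_le a hp i ((lo + hi) / 2) (by omega) (by omega)) hmid)
        h4
    · simp only [hmid, if_neg, not_false_iff]
      exact bisectAux_eq a x hp lo ((lo + hi) / 2) (by omega) (by omega) h3
        (fun i hi1 hi2 => lt_of_lt_of_le (by omega : x < a.getD ((lo + hi) / 2) 0)
          (pairwise_getD_le a hp ((lo + hi) / 2) i hi1 hi2))
  · simp only [h, dif_neg, not_false_iff]
    have hlohi : lo = hi := by omega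
    subst hlohi
    refine (takeWhile_len _ 0 a lo h2 (fun i hi' => by simpa using h3 i hi') (fun hl => ?_)).symm
    simpa using h4 lo (le_refl _) hl

theorem sampleAux_eq (mw : Int) (rs : List (List (String × String))) :
    ∀ (total : Int) (sampled : List (List (String × String))),
      sampleAux mw rs total sampled =
        sampled ++ rs.take ((prefixFrom total rs).takeWhile (fun y => decide (y ≤ mw))).length := by
  induction rs with
  | nil => intro total sampled; simp [sampleAux, prefixFrom]
  | cons r rest ih =>
      intro total sampled
      simp only [sampleAux, prefixFrom, List.takeWhile_cons]
      by_cases h : mw < total + countWords_py ((PySem.Dict.mk r).getD "review_text" "")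
      · have : decide (total + countWords_py ((PySem.Dict.mk r).getD "review_text" "") ≤ mw) = false := by
          simp only [decide_eq_false_iff_not, not_le]; omega
        simp [h, this]
      · have hd : decide (total + countWords_py ((PySem.Dict.mk r).getD "review_text" "") ≤ mw) = true := by
          simp only [decide_eq_true_eq]; omega
        simp only [h, if_neg, not_false_iff, hd, if_true, List.length_cons, List.take_succ_cons]
        rw [ih]
        simp

-- ===== VERDICT (by name: the statement is the Claim_ definition above) =====
theorem sample_reviews_py_spec : Claim_equal_sample_reviews_py := by
  intro reviews max_words _
  unfold Spec_sample_reviews_py sample_reviews_py sample_reviews_py_alt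
  rw [foldl_prefixStep reviews [] 0]
  simp only [List.nil_append]
  set P := prefixFrom 0 reviews with hP
  rw [bisectAux_eq P max_words (pairwise_prefixFrom reviews 0) 0 P.length (Nat.zero_le _)
    (le_refl _) (by omega) (by omega)]
  rw [sampleAux_eq max_words reviews 0 []]
  simp only [List.nil_append]
  set k := (P.takeWhile (fun y => decide (y ≤ max_words))).length with hk
  have hkle : k ≤ reviews.length := by
    have h1 := (List.takeWhile_sublist (l := P) (p := fun y => decide (y ≤ max_words))).length_le
    have h2 := length_prefixFrom reviews 0
    rw [← hP] at h2
    omega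
  by_cases hk0 : k = 0
  · simp [hk0]
  · have hpos : 0 < k := Nat.pos_of_ne_zero hk0
    have hne : (reviews.take k).isEmpty = false := by
      rw [List.isEmpty_eq_false_iff, ← List.length_pos_iff, List.length_take]
      omega
    rw [hne, if_neg (by simp), if_pos hpos, PySem.List.slice_to_natCast]
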